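-- pv_equiv track=rewrite | github.com/TomekWojdyla/pp1 | 12-Test3/mock1/p1.py | f
-- ===== SOURCE A (Python) =====
-- def f(word):
--     lent = len(word)
--     outp = ""
--     for i in range(lent):
--         for j in range(lent):
--             if i==j:
--                 outp += word[j].upper()
--             else:
--                 outp += word[j]
--         if i<lent-1:
--             outp+="-"
--         else:
--             pass
--     return outp
-- ===== SOURCE B (Python) =====
-- def f(word):
--     return "-".join(word[:i] + word[i].upper() + word[i+1:] for i in range(len(word)))
-- ===== Notes on version B (the rewrite author's own statement) =====
-- stated objective: simpler
-- what changed: Replaces the nested j-loop with i==j branching and manual separator bookkeeping by building each variant with slices word[:i]+word[i].upper()+word[i+1:] and assembling the result with a dash join.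
import Mathlib
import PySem

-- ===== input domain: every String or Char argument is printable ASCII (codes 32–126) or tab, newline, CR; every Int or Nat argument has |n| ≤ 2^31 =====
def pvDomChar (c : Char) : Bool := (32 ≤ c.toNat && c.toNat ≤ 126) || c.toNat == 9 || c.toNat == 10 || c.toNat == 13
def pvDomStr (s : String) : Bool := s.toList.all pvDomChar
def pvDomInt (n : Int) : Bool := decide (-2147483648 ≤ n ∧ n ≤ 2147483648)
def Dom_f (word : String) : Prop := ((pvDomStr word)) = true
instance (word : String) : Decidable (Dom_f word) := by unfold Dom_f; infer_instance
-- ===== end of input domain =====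

-- B replaces A's nested index loops and manual separator bookkeeping by slice-built variants assembled with a dash join (simpler, same cost).

-- ===== PORT A =====
def f (word : String) : String :=
  let cs := word.toList
  let lent := cs.length
  String.ofList ((List.range lent).foldl (fun (outp : List Char) (i : Nat) =>
    let outp2 := (List.range lent).foldl (fun (o : List Char) (j : Nat) =>
      if i = j then o ++ [PySem.Chars.upperChar ((PySem.List.pyGet? cs (j : Int)).getD ' ')]
      else o ++ [(PySem.List.pyGet? cs (j : Int)).getD ' ']) outp
    if i < lent - 1 then outp2 ++ ['-'] else outp2) [])

-- ===== PORT B =====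
def f_alt (word : String) : String :=
  let cs := word.toList
  String.ofList (PySem.Chars.join ['-'] ((List.range cs.length).map (fun (i : Nat) =>
    PySem.List.slice cs none (some (i : Int))
      ++ [PySem.Chars.upperChar ((PySem.List.pyGet? cs (i : Int)).getD ' ')]
      ++ PySem.List.slice cs (some ((i : Int) + 1)) none)))

-- ===== PRECONDITION & SPEC =====
def Spec_f (word : String) (out : String) : Prop := out = f_alt word
instance (word : String) (out : String) : Decidable (Spec_f word out) := by unfold Spec_f; infer_instance

-- ===== CLAIM (what is proved, stated in full; the proofs are below) =====
def Claim_equal_f : Prop := ∀ (word : String), Dom_f word → Spec_f word (f word)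

-- ===== LEMMAS AND PROOFS =====

-- reading every position of cs back by index reproduces cs
lemma map_range_getD (cs : List Char) :
    (List.range cs.length).map (fun j => cs[j]?.getD ' ') = cs := by
  induction cs with
  | nil => simp
  | cons c t ih =>
    rw [List.length_cons, List.range_succ_eq_map, List.map_cons, List.map_map]
    simp only [Function.comp_def, List.getElem?_cons_zero, List.getElem?_cons_succ,
      Option.getD_some]
    rw [ih]

-- A's inner j-loop result (as a map) is the i-th slice-built variant
lemma variant_eq (cs : List Char) (i : Nat) (h : i < cs.length) :
    (List.range cs.length).map (fun j =>
        if i = j then PySem.Chars.upperChar (cs[j]?.getD ' ') else cs[j]?.getD ' ')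
      = cs.take i ++ [PySem.Chars.upperChar (cs[i]?.getD ' ')] ++ cs.drop (i + 1) := by
  induction cs generalizing i with
  | nil => simp at h
  | cons c t ih =>
    rw [List.length_cons, List.range_succ_eq_map, List.map_cons, List.map_map]
    cases i with
    | zero =>
      simp [Function.comp_def, map_range_getD t]
    | succ i' =>
      have h' : i' < t.length := by simpa using h
      simp [Function.comp_def, ih i' h', List.take_succ_cons]

-- appending '-' after every variant except the last is a join
lemma flatMap_dash_join (n : Nat) (v : Nat → List Char) :
    (List.range n).flatMap (fun i => v i ++ if i < n - 1 then ['-'] else [])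
      = PySem.Chars.join ['-'] ((List.range n).map v) := by
  induction n generalizing v with
  | zero => simp [PySem.Chars.join_nil]
  | succ m ih =>
    rcases m with _ | m'
    · simp [List.range_succ, PySem.Chars.join_singleton]
    · rw [List.range_succ_eq_map, List.flatMap_cons, List.map_cons, List.flatMap_map,
        List.map_map]
      rw [if_pos (by omega : (0:Nat) < m' + 1 + 1 - 1)]
      simp only [Function.comp_def]
      have hcond : (List.range (m' + 1)).flatMap
            (fun i => v (i + 1) ++ if i + 1 < m' + 1 + 1 - 1 then ['-'] else [])
          = (List.range (m' + 1)).flatMap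
            (fun i => v (i + 1) ++ if i < m' + 1 - 1 then ['-'] else []) := by
        congr 1
        funext i
        congr 1
        by_cases hc : i < m' + 1 - 1
        · rw [if_pos (by omega), if_pos hc]
        · rw [if_neg (by omega), if_neg hc]
      rw [hcond, ih (fun i => v (i + 1))]
      have hne : (List.range (m' + 1)).map (fun i => v (i + 1))
          = v 1 :: (List.range m').map (fun i => v (i + 1 + 1)) := by
        rw [List.range_succ_eq_map, List.map_cons, List.map_map]
        simp [Function.comp_def]
      rw [hne, PySem.Chars.join_cons_cons]

-- ===== VERDICT (by name: the statement is the Claim_ definition above) =====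
theorem f_spec : Claim_equal_f := by
  unfold Claim_equal_f Spec_f f f_alt
  intro word _
  dsimp only
  congr 1
  rw [PySem.List.foldl_congr_mem _ _
    (fun outp i => outp ++ ((word.toList.take i
        ++ [PySem.Chars.upperChar (word.toList[i]?.getD ' ')]
        ++ word.toList.drop (i + 1))
      ++ if i < word.toList.length - 1 then ['-'] else [])) _ ?side]
  · rw [PySem.List.foldl_append_eq_flatMap, List.nil_append, flatMap_dash_join]
    congr 1
    apply List.map_congr_left
    intro i hi
    have hi' : i < word.toList.length := List.mem_range.mp hi
    have hcast : ((i : Int) + 1) = ((i + 1 : Nat) : Int) := by push_cast; ring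
    rw [hcast, PySem.List.slice_to_natCast, PySem.List.slice_from_natCast]
    simp
  case side =>
    intro acc i hi
    have hi' : i < word.toList.length := List.mem_range.mp hi
    dsimp only
    have hinner : (List.range word.toList.length).foldl (fun o j =>
        if i = j then o ++ [PySem.Chars.upperChar ((PySem.List.pyGet? word.toList (j : Int)).getD ' ')]
        else o ++ [(PySem.List.pyGet? word.toList (j : Int)).getD ' ']) acc
        = acc ++ (word.toList.take i
            ++ [PySem.Chars.upperChar (word.toList[i]?.getD ' ')]
            ++ word.toList.drop (i + 1)) := by
      have hfun : (fun (o : List Char) j =>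
          if i = j then o ++ [PySem.Chars.upperChar ((PySem.List.pyGet? word.toList (j : Int)).getD ' ')]
          else o ++ [(PySem.List.pyGet? word.toList (j : Int)).getD ' '])
          = (fun (o : List Char) j => o ++ [if i = j
              then PySem.Chars.upperChar (word.toList[j]?.getD ' ')
              else word.toList[j]?.getD ' ']) := by
        funext o j
        simp only [PySem.List.pyGet?_natCast]
        split <;> rfl
      rw [hfun, PySem.List.foldl_append_singleton_eq_map, variant_eq _ _ hi']
    rw [hinner]
    split <;> simp [List.append_assoc]
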